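-- pv_equiv track=rewrite | github.com/lewisoaten/aoc24 | aoc24/09_2/challenge.py | init_disk_index
-- ===== SOURCE A (Python) =====
-- def init_disk_index(disk_map: tuple[int]) -> list[tuple[int, int]]:
--     disk = []
--     is_file = True
--     file_id = 0
--
--     for map_item in disk_map:
--         if is_file:
--             disk.append((file_id, map_item, False))
--             file_id += 1
--         else:
--             disk.append((None, map_item, False))
--
--         is_file = not is_file
--
--     return disk
-- ===== SOURCE B (Python) =====
-- def init_disk_index(disk_map: tuple[int]) -> list[tuple[int, int]]:
--     # stage 1: cut the map into [file_size, gap_size] chunks (last chunk may be a lone file size)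
--     chunks = [disk_map[i:i + 2] for i in range(0, len(disk_map), 2)]
--     # stage 2: a chunk's position is its file id; emit the file entry, then the gap entry if present
--     disk = []
--     for fid, chunk in enumerate(chunks):
--         disk.append((fid, chunk[0], False))
--         if len(chunk) == 2:
--             disk.append((None, chunk[1], False))
--     return disk
-- ===== Notes on version B (the rewrite author's own statement) =====
-- stated objective: alternative
-- what changed: Replaces the single stateful pass with its is_file toggle and running file_id counter by two staged passes: first slice the map into [file,gap] chunks of two, then emit one or two entries per chunk using the chunk index as the file id.
import Mathlib
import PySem

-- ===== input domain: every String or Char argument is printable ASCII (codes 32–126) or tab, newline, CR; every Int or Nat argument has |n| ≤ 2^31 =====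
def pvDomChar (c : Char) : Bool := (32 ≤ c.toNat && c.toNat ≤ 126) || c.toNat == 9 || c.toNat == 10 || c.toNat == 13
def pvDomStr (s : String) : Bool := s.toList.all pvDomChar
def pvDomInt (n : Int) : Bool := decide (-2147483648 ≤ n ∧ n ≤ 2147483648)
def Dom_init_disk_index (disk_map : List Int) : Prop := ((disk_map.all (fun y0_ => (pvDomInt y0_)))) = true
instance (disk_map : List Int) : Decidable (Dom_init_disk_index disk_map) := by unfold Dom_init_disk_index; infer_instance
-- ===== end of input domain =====

-- B replaces A's stateful toggle/counter pass by two staged passes: chunk the map into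
-- [file,gap] pairs, then emit entries per chunk (chunk index = file id); same cost.


-- ===== PORT A =====
def init_disk_index (disk_map : List Int) : List (Option Int × Int × Bool) :=
  (disk_map.foldl
    (fun (st : List (Option Int × Int × Bool) × Bool × Int) map_item =>
      let disk := st.1
      let is_file := st.2.1
      let file_id := st.2.2
      if is_file then
        (disk ++ [(some file_id, map_item, false)], !is_file, file_id + 1)
      else
        (disk ++ [(none, map_item, false)], !is_file, file_id))
    ([], true, 0)).1

-- ===== PORT B =====
def init_disk_index_alt (disk_map : List Int) : List (Option Int × Int × Bool) :=
  -- chunks = [disk_map[i:i+2] for i in range(0, len(disk_map), 2)]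
  let chunks := (PySem.List.pyRange 0 (disk_map.length : Int) 2).map
      (fun i => PySem.List.slice disk_map (some i) (some (i + 2)))
  -- for fid, chunk in enumerate(chunks): append file entry, then gap entry if len(chunk) == 2
  (PySem.List.enumerate chunks).foldl
    (fun disk p =>
      let disk := disk ++ [(some p.1, PySem.List.pyGetD p.2 0 0, false)]
      if p.2.length == 2 then disk ++ [(none, PySem.List.pyGetD p.2 1 0, false)] else disk)
    []

-- ===== PRECONDITION & SPEC =====
def Spec_init_disk_index (disk_map : List Int) (out : List (Option Int × Int × Bool)) : Prop := out = init_disk_index_alt disk_map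
instance (disk_map : List Int) (out : List (Option Int × Int × Bool)) : Decidable (Spec_init_disk_index disk_map out) := by unfold Spec_init_disk_index; infer_instance

-- ===== CLAIM =====
def Claim_equal_init_disk_index : Prop := ∀ (disk_map : List Int), Dom_init_disk_index disk_map → Spec_init_disk_index disk_map (init_disk_index disk_map)

-- ===== LEMMAS AND PROOFS =====

-- common normal form: the [file, gap?] pair decomposition of the map
def pvPairs (fid : Int) : List Int → List (Option Int × Int × Bool)
  | [] => []
  | [x] => [(some fid, x, false)]
  | x :: y :: rest => (some fid, x, false) :: (none, y, false) :: pvPairs (fid + 1) rest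

def pvChunkPairs : List Int → List (List Int)
  | [] => []
  | [x] => [[x]]
  | x :: y :: rest => [x, y] :: pvChunkPairs rest

-- A's fold from a "file" state equals pvPairs
theorem pvFoldA : ∀ (n : Nat) (xs : List Int), xs.length ≤ n →
    ∀ (fid : Int) (acc : List (Option Int × Int × Bool)),
    (xs.foldl
      (fun (st : List (Option Int × Int × Bool) × Bool × Int) map_item =>
        let disk := st.1
        let is_file := st.2.1
        let file_id := st.2.2
        if is_file then
          (disk ++ [(some file_id, map_item, false)], !is_file, file_id + 1)
        else
          (disk ++ [(none, map_item, false)], !is_file, file_id))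
      (acc, true, fid)).1 = acc ++ pvPairs fid xs := by
  intro n
  induction n with
  | zero =>
    intro xs h fid acc
    have : xs = [] := List.length_eq_zero_iff.mp (Nat.le_zero.mp h)
    subst this; simp [pvPairs]
  | succ n ih =>
    intro xs h fid acc
    match xs with
    | [] => simp [pvPairs]
    | [x] => simp [pvPairs]
    | x :: y :: rest =>
      have hr : rest.length ≤ n := by simp at h; omega
      have := ih rest hr (fid + 1) (acc ++ [(some fid, x, false)] ++ [(none, y, false)])
      simpa [pvPairs, List.foldl_cons] using this

-- chunking by Nat ranges equals pvChunkPairs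
theorem pvChunksNat : ∀ (n : Nat) (xs : List Int), xs.length ≤ n →
    (List.range ((xs.length + 1) / 2)).map (fun k => (xs.drop (2 * k)).take 2) = pvChunkPairs xs := by
  intro n
  induction n with
  | zero =>
    intro xs h
    have : xs = [] := List.length_eq_zero_iff.mp (Nat.le_zero.mp h)
    subst this; simp [pvChunkPairs]
  | succ n ih =>
    intro xs h
    match xs with
    | [] => simp [pvChunkPairs]
    | [x] => simp [pvChunkPairs]
    | x :: y :: rest =>
      have hr : rest.length ≤ n := by simp at h; omega
      have hlen : ((x :: y :: rest).length + 1) / 2 = (rest.length + 1) / 2 + 1 := by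
        simp; omega
      rw [hlen, List.range_succ_eq_map, List.map_cons, List.map_map]
      have := ih rest hr
      simp only [Function.comp_def]
      have hstep : (List.range ((rest.length + 1) / 2)).map
          (fun k => ((x :: y :: rest).drop (2 * (k + 1))).take 2)
          = (List.range ((rest.length + 1) / 2)).map (fun k => (rest.drop (2 * k)).take 2) := by
        apply List.map_congr_left
        intro k _
        have : 2 * (k + 1) = 2 * k + 2 := by omega
        rw [this]
        rfl
      rw [hstep, this]
      simp [pvChunkPairs]

-- B's chunk list equals pvChunkPairs
theorem pvChunksEq (xs : List Int) :
    (PySem.List.pyRange 0 (xs.length : Int) 2).map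
      (fun i => PySem.List.slice xs (some i) (some (i + 2))) = pvChunkPairs xs := by
  rw [PySem.List.pyRange_of_pos 0 (xs.length : Int) (by norm_num), List.map_map]
  have hcount : (if (0 : Int) < (xs.length : Int) then (((xs.length : Int) - 0 + 2 - 1) / 2).toNat else 0)
      = (xs.length + 1) / 2 := by
    by_cases h : 0 < xs.length
    · have : (0 : Int) < (xs.length : Int) := by exact_mod_cast h
      simp only [this, if_pos]
      omega
    · have h0 : xs.length = 0 := by omega
      simp [h0]
  rw [hcount]
  have hmap : ∀ k : Nat, (fun i => PySem.List.slice xs (some i) (some (i + 2))) ((fun k : Nat => (0 : Int) + 2 * (k : Int)) k)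
      = (xs.drop (2 * k)).take 2 := by
    intro k
    simp only []
    have h1 : (0 : Int) + 2 * (k : Int) = ((2 * k : Nat) : Int) := by push_cast; ring
    have h2 : ((2 * k : Nat) : Int) + 2 = ((2 * k + 2 : Nat) : Int) := by push_cast; ring
    rw [h1, h2, PySem.List.slice_natCast]
    have h3 : (2 * k + 2) - (2 * k) = 2 := by omega
    rw [h3]
  calc (List.range ((xs.length + 1) / 2)).map
        ((fun i => PySem.List.slice xs (some i) (some (i + 2))) ∘ (fun k : Nat => (0 : Int) + 2 * (k : Int)))
      = (List.range ((xs.length + 1) / 2)).map (fun k => (xs.drop (2 * k)).take 2) := by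
        apply List.map_congr_left; intro k _; exact hmap k
    _ = pvChunkPairs xs := pvChunksNat xs.length xs le_rfl

-- B's emit loop over the chunk pairs equals pvPairs
theorem pvFoldB : ∀ (n : Nat) (xs : List Int), xs.length ≤ n →
    ∀ (s : Int) (acc : List (Option Int × Int × Bool)),
    ((PySem.List.enumerate (pvChunkPairs xs) s).foldl
      (fun disk p =>
        let disk := disk ++ [(some p.1, PySem.List.pyGetD p.2 0 0, false)]
        if p.2.length == 2 then disk ++ [(none, PySem.List.pyGetD p.2 1 0, false)] else disk)
      acc) = acc ++ pvPairs s xs := by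
  intro n
  induction n with
  | zero =>
    intro xs h s acc
    have : xs = [] := List.length_eq_zero_iff.mp (Nat.le_zero.mp h)
    subst this; simp [pvChunkPairs, pvPairs]
  | succ n ih =>
    intro xs h s acc
    match xs with
    | [] => simp [pvChunkPairs, pvPairs]
    | [x] =>
      simp [pvChunkPairs, pvPairs, PySem.List.enumerate_cons, PySem.List.enumerate_nil,
        PySem.List.pyGetD]

    | x :: y :: rest =>
      have hr : rest.length ≤ n := by simp at h; omega
      have := ih rest hr (s + 1) (acc ++ [(some s, x, false), (none, y, false)])
      simp only [pvChunkPairs, PySem.List.enumerate_cons, List.foldl_cons]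
      simpa [pvPairs, PySem.List.pyGetD] using this

-- ===== VERDICT =====
theorem init_disk_index_spec : Claim_equal_init_disk_index := by
  intro disk_map _
  unfold Spec_init_disk_index init_disk_index init_disk_index_alt
  rw [pvFoldA disk_map.length disk_map le_rfl 0 []]
  rw [pvChunksEq disk_map, pvFoldB disk_map.length disk_map le_rfl 0 []]
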